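-- pv_equiv track=rewrite | github.com/hegelespaul/PGPG | Chord_Dictionaries/no_bar_chords.py | positions_for_set
-- ===== SOURCE A (Python) =====
-- from itertools import product
--
-- def is_valid_chord(chord):
--     """No repeated strings, no repeated pitch classes, fits within 5 frets"""
--     strings = [s for (s, _, _) in chord]
--     pcs = [pc for (_, _, pc) in chord]
--     if len(strings) != len(set(strings)):
--         return False
--     if len(pcs) != len(set(pcs)):
--         return False
--     frets = [f for (_, f, _) in chord]
--     return (max(frets) - min(frets) + 1) <= 5
--
-- def positions_for_set(forte_set, pisadas):
--     """Return all combinations of fret positions matching a Forte set"""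
--     groups = []
--     for pc in forte_set:
--         group = [p for p in pisadas if p[2] == pc]
--         if not group:
--             return []
--         groups.append(group)
--
--     combos = []
--     for prod in product(*groups):
--         if is_valid_chord(prod):
--             combos.append(list(prod))
--     return combos
-- ===== SOURCE B (Python) =====
-- def positions_for_set(forte_set, pisadas):
--     """Return all combinations of fret positions matching a Forte set.
--
--     Backtracking over the pitch-class groups with incremental pruning
--     (used strings, used pitch classes, running fret span) instead of
--     generating the full cartesian product and filtering afterwards.
--     """
--     groups = []
--     for pc in forte_set:
--         group = [p for p in pisadas if p[2] == pc]
--         if not group: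
--             return []
--         groups.append(group)
--
--     results = []
--
--     def bt(i, partial, used_strings, used_pcs, lo, hi):
--         if i == len(groups):
--             results.append(list(partial))
--             return
--         for (s, f, pc) in groups[i]:
--             if s in used_strings or pc in used_pcs:
--                 continue
--             nlo = f if lo is None else min(lo, f)
--             nhi = f if hi is None else max(hi, f)
--             if nhi - nlo + 1 > 5:
--                 continue
--             partial.append((s, f, pc))
--             bt(i + 1, partial, used_strings | {s}, used_pcs | {pc}, nlo, nhi)
--             partial.pop()
--
--     bt(0, [], set(), set(), None, None)
--     return results
-- ===== Notes on version B (the rewrite author's own statement) =====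
-- stated objective: alternative
-- what changed: Replaces itertools.product over all groups followed by a whole-chord validity filter with a recursive backtracking search that extends a partial chord group by group, pruning on used strings, used pitch classes and the running fret span, emitting results in the same product order.
import Mathlib
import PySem

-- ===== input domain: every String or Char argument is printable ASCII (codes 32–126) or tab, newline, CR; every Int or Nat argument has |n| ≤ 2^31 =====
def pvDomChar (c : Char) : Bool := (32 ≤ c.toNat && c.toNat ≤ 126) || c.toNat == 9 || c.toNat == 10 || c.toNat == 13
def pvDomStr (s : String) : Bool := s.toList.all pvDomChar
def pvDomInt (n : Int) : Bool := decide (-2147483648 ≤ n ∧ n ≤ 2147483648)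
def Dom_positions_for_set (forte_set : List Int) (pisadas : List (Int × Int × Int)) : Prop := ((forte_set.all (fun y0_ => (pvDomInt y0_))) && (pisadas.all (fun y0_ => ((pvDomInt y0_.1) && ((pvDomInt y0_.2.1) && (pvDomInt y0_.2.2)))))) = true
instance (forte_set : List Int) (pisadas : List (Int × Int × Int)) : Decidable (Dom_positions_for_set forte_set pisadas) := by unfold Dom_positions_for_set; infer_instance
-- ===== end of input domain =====

-- B replaces the full cartesian product + post-hoc filter by a backtracking search that
-- prunes partial chords early (used strings / used pitch classes / running fret span);
-- objective: alternative (same results in the same order, pruning instead of filtering).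

-- ===== PORT A =====

-- the `for pc in forte_set` group-building loop with its early `return []` (none = early return)
def pvGroupsA : List Int → List (Int × Int × Int) → Option (List (List (Int × Int × Int)))
  | [], _ => some []
  | pc :: rest, pisadas =>
    let group := pisadas.filter (fun p => p.2.2 == pc)
    if group.isEmpty then none
    else
      match pvGroupsA rest pisadas with
      | none => none
      | some gs => some (group :: gs)

-- itertools.product(*groups): first group varies slowest
def pvProduct : List (List (Int × Int × Int)) → List (List (Int × Int × Int))
  | [] => [[]]
  | g :: gs => g.flatMap (fun x => (pvProduct gs).map (x :: ·))

-- is_valid_chord; on an empty chord Python raises ValueError (max of empty) — here false, unreachable under Pre_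
def pvIsValidChord (chord : List (Int × Int × Int)) : Bool :=
  let strings := chord.map (fun p => p.1)
  let pcs := chord.map (fun p => p.2.2)
  if PySem.List.len strings ≠ PySem.Set.len (PySem.Set.ofList strings) then false
  else if PySem.List.len pcs ≠ PySem.Set.len (PySem.Set.ofList pcs) then false
  else
    match PySem.List.max? (chord.map (fun p => p.2.1)) (fun y => y),
          PySem.List.min? (chord.map (fun p => p.2.1)) (fun y => y) with
    | some mx, some mn => decide (mx - mn + 1 ≤ 5)
    | _, _ => false

def positions_for_set (forte_set : List Int) (pisadas : List (Int × Int × Int)) : List (List (Int × Int × Int)) :=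
  match pvGroupsA forte_set pisadas with
  | none => []
  | some groups => (pvProduct groups).filter pvIsValidChord

-- ===== PORT B =====

-- Source B builds the same groups list (same loop, same early return)
def pvGroupsB : List Int → List (Int × Int × Int) → Option (List (List (Int × Int × Int)))
  | [], _ => some []
  | pc :: rest, pisadas =>
    let group := pisadas.filter (fun p => p.2.2 == pc)
    if group.isEmpty then none
    else
      match pvGroupsB rest pisadas with
      | none => none
      | some gs => some (group :: gs)

-- the recursive bt(i, partial, used_strings, used_pcs, lo, hi)
def pvBT : List (List (Int × Int × Int)) → List (Int × Int × Int) →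
    PySem.Set Int → PySem.Set Int → Option Int → Option Int → List (List (Int × Int × Int))
  | [], part, _, _, _, _ => [part]
  | g :: rest, part, usedS, usedP, lo, hi =>
    g.flatMap (fun c =>
      if PySem.Set.contains usedS c.1 || PySem.Set.contains usedP c.2.2 then []
      else
        let nlo := match lo with | none => c.2.1 | some v => min v c.2.1
        let nhi := match hi with | none => c.2.1 | some v => max v c.2.1
        if nhi - nlo + 1 > 5 then []
        else pvBT rest (part ++ [c]) (PySem.Set.add usedS c.1) (PySem.Set.add usedP c.2.2) (some nlo) (some nhi))

def positions_for_set_alt (forte_set : List Int) (pisadas : List (Int × Int × Int)) : List (List (Int × Int × Int)) :=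
  match pvGroupsB forte_set pisadas with
  | none => []
  | some groups => pvBT groups [] PySem.Set.empty PySem.Set.empty none none

-- ===== PRECONDITION & SPEC =====
-- Pre_ excludes only forte_set = [], on which A raises ValueError (max() of an empty sequence).
def Pre_positions_for_set (forte_set : List Int) (pisadas : List (Int × Int × Int)) : Prop := forte_set ≠ []
instance (forte_set : List Int) (pisadas : List (Int × Int × Int)) : Decidable (Pre_positions_for_set forte_set pisadas) := by unfold Pre_positions_for_set; infer_instance
def pvWitness_positions_for_set : List Int × (List (Int × Int × Int)) := ([0, 4], [(1, 0, 0), (2, 4, 4), (1, 4, 4), (3, 2, 0)])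

def Spec_positions_for_set (forte_set : List Int) (pisadas : List (Int × Int × Int)) (out : List (List (Int × Int × Int))) : Prop := out = positions_for_set_alt forte_set pisadas
instance (forte_set : List Int) (pisadas : List (Int × Int × Int)) (out : List (List (Int × Int × Int))) : Decidable (Spec_positions_for_set forte_set pisadas out) := by unfold Spec_positions_for_set; infer_instance

-- ===== CLAIM (what is proved, stated in full; the proofs are below) =====
def Claim_equal_positions_for_set : Prop := ∀ (forte_set : List Int) (pisadas : List (Int × Int × Int)), Dom_positions_for_set forte_set pisadas → Pre_positions_for_set forte_set pisadas → Spec_positions_for_set forte_set pisadas (positions_for_set forte_set pisadas)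

-- ===== LEMMAS AND PROOFS =====

-- the two group-building loops are the same code
lemma pv_groups_eq (forte_set : List Int) (pisadas : List (Int × Int × Int)) :
    pvGroupsB forte_set pisadas = pvGroupsA forte_set pisadas := by
  induction forte_set with
  | nil => rfl
  | cons pc rest ih => simp [pvGroupsA, pvGroupsB, ih]

-- len(xs) == len(set(xs)) is exactly Nodup
lemma pv_len_ofList_iff (l : List Int) : (PySem.Set.ofList l).length = l.length ↔ l.Nodup := by
  induction l with
  | nil => simp [PySem.Set.ofList]
  | cons x xs ih =>
    rw [PySem.Set.ofList_cons]
    by_cases hx : x ∈ xs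
    · have hmem : x ∈ PySem.Set.ofList xs := (PySem.Set.mem_ofList xs x).2 hx
      have hlt : ((PySem.Set.ofList xs).discard x).length < (PySem.Set.ofList xs).length := by
        unfold PySem.Set.discard
        apply List.length_filter_lt_length_iff_exists.2
        exact ⟨x, hmem, by simp⟩
      have hle := PySem.Set.length_ofList_le xs
      simp only [List.length_cons]
      constructor
      · intro h; omega
      · intro h; exact absurd hx (by simp_all [List.nodup_cons])
    · have hd : (PySem.Set.ofList xs).discard x = PySem.Set.ofList xs := by
        unfold PySem.Set.discard
        apply List.filter_eq_self.2
        intro a ha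
        have : a ∈ xs := (PySem.Set.mem_ofList xs a).1 ha
        simp; rintro rfl; exact hx this
      rw [hd]
      simp [List.nodup_cons, hx, ih]

-- is_valid_chord, rephrased through Nodup
lemma pv_valid_eq (chord : List (Int × Int × Int)) :
    pvIsValidChord chord =
      ((chord.map (fun p => p.1)).Nodup && (chord.map (fun p => p.2.2)).Nodup &&
        match PySem.List.max? (chord.map (fun p => p.2.1)) (fun y => y),
              PySem.List.min? (chord.map (fun p => p.2.1)) (fun y => y) with
        | some mx, some mn => decide (mx - mn + 1 ≤ 5)
        | _, _ => false) := by
  unfold pvIsValidChord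
  have h1 : (PySem.List.len (chord.map (fun p => p.1)) = PySem.Set.len (PySem.Set.ofList (chord.map (fun p => p.1)))) ↔ (chord.map (fun p => p.1)).Nodup := by
    rw [← pv_len_ofList_iff]
    simp [PySem.List.len_eq, PySem.Set.len]
    omega
  have h2 : (PySem.List.len (chord.map (fun p => p.2.2)) = PySem.Set.len (PySem.Set.ofList (chord.map (fun p => p.2.2)))) ↔ (chord.map (fun p => p.2.2)).Nodup := by
    rw [← pv_len_ofList_iff]
    simp [PySem.List.len_eq, PySem.Set.len]
    omega
  by_cases hn1 : (chord.map (fun p => p.1)).Nodup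
  · rw [if_neg (not_not_intro (h1.mpr hn1))]
    by_cases hn2 : (chord.map (fun p => p.2.2)).Nodup
    · rw [if_neg (not_not_intro (h2.mpr hn2))]; simp [hn1, hn2]
    · rw [if_pos (fun h => hn2 (h2.mp h))]; simp [hn1, hn2]
  · rw [if_pos (fun h => hn1 (h1.mp h))]; simp [hn1]

lemma pv_max?_append_singleton (xs : List Int) (f : Int) :
    PySem.List.max? (xs ++ [f]) (fun y => y) =
      some (match PySem.List.max? xs (fun y => y) with | none => f | some v => max v f) := by
  cases xs with
  | nil => simp [PySem.List.max?]
  | cons x t =>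
    rw [List.cons_append, PySem.List.max?_id_cons, PySem.List.max?_id_cons]
    simp [List.foldl_append]

lemma pv_min?_append_singleton (xs : List Int) (f : Int) :
    PySem.List.min? (xs ++ [f]) (fun y => y) =
      some (match PySem.List.min? xs (fun y => y) with | none => f | some v => min v f) := by
  cases xs with
  | nil => simp [PySem.List.min?]
  | cons x t =>
    rw [List.cons_append, PySem.List.min?_id_cons, PySem.List.min?_id_cons]
    simp [List.foldl_append]

-- a chord whose strings already repeat can never become valid
lemma pv_invalid_dup_strings (xs t : List (Int × Int × Int))
    (h : ¬ (xs.map (fun p => p.1)).Nodup) : pvIsValidChord (xs ++ t) = false := by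
  rw [pv_valid_eq]
  have h2 : ¬ ((xs ++ t).map (fun p => p.1)).Nodup := by
    rw [List.map_append]
    exact fun hn => h (hn.sublist (List.sublist_append_left _ _))
  rw [List.map_append] at h2
  simp [h2]

lemma pv_invalid_dup_pcs (xs t : List (Int × Int × Int))
    (h : ¬ (xs.map (fun p => p.2.2)).Nodup) : pvIsValidChord (xs ++ t) = false := by
  rw [pv_valid_eq]
  have h2 : ¬ ((xs ++ t).map (fun p => p.2.2)).Nodup := by
    rw [List.map_append]
    exact fun hn => h (hn.sublist (List.sublist_append_left _ _))
  rw [List.map_append] at h2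
  simp [h2]

-- once the fret span exceeds 5 no extension is valid
lemma pv_invalid_span (xs t : List (Int × Int × Int)) (mx mn : Int)
    (hmx : PySem.List.max? (xs.map (fun p => p.2.1)) (fun y => y) = some mx)
    (hmn : PySem.List.min? (xs.map (fun p => p.2.1)) (fun y => y) = some mn)
    (h : mx - mn + 1 > 5) : pvIsValidChord (xs ++ t) = false := by
  rw [pv_valid_eq]
  have hxs : xs.map (fun p => p.2.1) ≠ [] := by
    intro he; rw [he] at hmx; simp [PySem.List.max?] at hmx
  have hwne : (xs ++ t).map (fun p => p.2.1) ≠ [] := by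
    simp only [List.map_append]; intro he; exact hxs (List.append_eq_nil_iff.1 he).1
  obtain ⟨M, hM⟩ : ∃ M, PySem.List.max? ((xs ++ t).map (fun p => p.2.1)) (fun y => y) = some M := by
    cases hc : PySem.List.max? ((xs ++ t).map (fun p => p.2.1)) (fun y => y) with
    | none => exact absurd ((PySem.List.max?_eq_none_iff _ _).1 hc) hwne
    | some M => exact ⟨M, rfl⟩
  obtain ⟨m, hm⟩ : ∃ m, PySem.List.min? ((xs ++ t).map (fun p => p.2.1)) (fun y => y) = some m := by
    cases hc : PySem.List.min? ((xs ++ t).map (fun p => p.2.1)) (fun y => y) with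
    | none => exact absurd ((PySem.List.min?_eq_none_iff _ _).1 hc) hwne
    | some m => exact ⟨m, rfl⟩
  have hmxmem : mx ∈ (xs ++ t).map (fun p => p.2.1) := by
    rw [List.map_append]
    exact List.mem_append_left _ (PySem.List.max?_mem hmx)
  have hmnmem : mn ∈ (xs ++ t).map (fun p => p.2.1) := by
    rw [List.map_append]
    exact List.mem_append_left _ (PySem.List.min?_mem hmn)
  have h1 : mx ≤ M := PySem.List.max?_isMax hM mx hmxmem
  have h2 : m ≤ mn := PySem.List.min?_isMin hm mn hmnmem
  rw [hM, hm]
  simp only [Bool.and_eq_false_iff]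
  right
  simp only [decide_eq_false_iff_not]
  omega

-- a valid (or empty) chord stays valid after one compatible position
lemma pv_valid_extend (part : List (Int × Int × Int)) (c : Int × Int × Int)
    (hv : part = [] ∨ pvIsValidChord part = true)
    (hs : c.1 ∉ part.map (fun p => p.1)) (hp : c.2.2 ∉ part.map (fun p => p.2.2))
    (hspan : (match PySem.List.max? (part.map (fun p => p.2.1)) (fun y => y) with
                | none => c.2.1 | some v => max v c.2.1)
             - (match PySem.List.min? (part.map (fun p => p.2.1)) (fun y => y) with
                | none => c.2.1 | some v => min v c.2.1) + 1 ≤ 5) :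
    pvIsValidChord (part ++ [c]) = true := by
  have hns : (part.map (fun p => p.1)).Nodup ∧ (part.map (fun p => p.2.2)).Nodup := by
    rcases hv with h | h
    · subst h; simp
    · rw [pv_valid_eq] at h
      simp only [Bool.and_eq_true, decide_eq_true_eq] at h
      exact ⟨h.1.1, h.1.2⟩
  rw [pv_valid_eq]
  simp only [List.map_append, List.map_cons, List.map_nil]
  rw [pv_max?_append_singleton, pv_min?_append_singleton]
  simp only [Bool.and_eq_true, decide_eq_true_eq]
  refine ⟨⟨?_, ?_⟩, hspan⟩
  · exact List.nodup_append.2 ⟨hns.1, List.nodup_singleton _, fun a ha b hb => by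
      simp at hb; subst hb; rintro rfl; exact hs ha⟩
  · exact List.nodup_append.2 ⟨hns.2, List.nodup_singleton _, fun a ha b hb => by
      simp at hb; subst hb; rintro rfl; exact hp ha⟩

-- the backtracking invariant: bt over the remaining groups emits exactly the valid extensions, in product order
lemma pv_bt_eq (groups : List (List (Int × Int × Int))) (part : List (Int × Int × Int))
    (usedS usedP : PySem.Set Int) (lo hi : Option Int)
    (hS : usedS = PySem.Set.ofList (part.map (fun p => p.1)))
    (hP : usedP = PySem.Set.ofList (part.map (fun p => p.2.2)))
    (hlo : lo = PySem.List.min? (part.map (fun p => p.2.1)) (fun y => y))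
    (hhi : hi = PySem.List.max? (part.map (fun p => p.2.1)) (fun y => y))
    (hv : part = [] ∨ pvIsValidChord part = true)
    (hne : part = [] → groups ≠ []) :
    pvBT groups part usedS usedP lo hi =
      (pvProduct groups).filterMap
        (fun t => if pvIsValidChord (part ++ t) then some (part ++ t) else none) := by
  induction groups generalizing part usedS usedP lo hi with
  | nil =>
    have hvp : pvIsValidChord part = true := by
      rcases hv with h | h
      · exact absurd rfl (hne h)
      · exact h
    simp [pvBT, pvProduct, hvp]
  | cons g rest ih =>
    simp only [pvBT, pvProduct]
    rw [List.filterMap_flatMap]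
    apply List.flatMap_congr
    intro c hc
    rw [List.filterMap_map]
    have hcontS : PySem.Set.contains usedS c.1 = decide (c.1 ∈ part.map (fun p => p.1)) := by
      rw [hS]; simp [PySem.Set.contains, PySem.Set.mem_ofList]
    have hcontP : PySem.Set.contains usedP c.2.2 = decide (c.2.2 ∈ part.map (fun p => p.2.2)) := by
      rw [hP]; simp [PySem.Set.contains, PySem.Set.mem_ofList]
    by_cases hs : c.1 ∈ part.map (fun p => p.1)
    · rw [hcontS]
      simp only [hs, decide_true, Bool.true_or, if_true]
      symm
      apply List.filterMap_eq_nil_iff.2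
      intro t ht
      have hdup : ¬ ((part ++ [c]).map (fun p => p.1)).Nodup := by
        rw [List.map_append]
        intro hn
        rcases List.nodup_append.1 hn with ⟨_, _, hdisj⟩
        exact hdisj c.1 hs c.1 (by simp) rfl
      simp only [Function.comp]
      rw [List.append_cons, pv_invalid_dup_strings (part ++ [c]) t hdup]
      simp
    · by_cases hp : c.2.2 ∈ part.map (fun p => p.2.2)
      · rw [hcontP]
        simp only [hp, decide_true, Bool.or_true, if_true]
        symm
        apply List.filterMap_eq_nil_iff.2
        intro t ht
        have hdup : ¬ ((part ++ [c]).map (fun p => p.2.2)).Nodup := by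
          rw [List.map_append]
          intro hn
          rcases List.nodup_append.1 hn with ⟨_, _, hdisj⟩
          exact hdisj c.2.2 hp c.2.2 (by simp) rfl
        simp only [Function.comp]
        rw [List.append_cons, pv_invalid_dup_pcs (part ++ [c]) t hdup]
        simp
      · rw [hcontS, hcontP]
        simp only [hs, hp, decide_false, Bool.or_false]
        rw [hlo, hhi]
        have hmx : PySem.List.max? ((part ++ [c]).map (fun p => p.2.1)) (fun y => y) =
            some (match PySem.List.max? (part.map (fun p => p.2.1)) (fun y => y) with
                  | none => c.2.1 | some v => max v c.2.1) := by
          rw [List.map_append]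
          exact pv_max?_append_singleton _ _
        have hmn : PySem.List.min? ((part ++ [c]).map (fun p => p.2.1)) (fun y => y) =
            some (match PySem.List.min? (part.map (fun p => p.2.1)) (fun y => y) with
                  | none => c.2.1 | some v => min v c.2.1) := by
          rw [List.map_append]
          exact pv_min?_append_singleton _ _
        by_cases hspan : (match PySem.List.max? (part.map (fun p => p.2.1)) (fun y => y) with
                | none => c.2.1 | some v => max v c.2.1)
             - (match PySem.List.min? (part.map (fun p => p.2.1)) (fun y => y) with
                | none => c.2.1 | some v => min v c.2.1) + 1 > 5
        · rw [if_pos hspan]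
          symm
          apply List.filterMap_eq_nil_iff.2
          intro t ht
          simp only [Function.comp]
          rw [List.append_cons, pv_invalid_span (part ++ [c]) t _ _ hmx hmn hspan]
          simp
        · rw [if_neg hspan]
          rw [ih (part ++ [c]) _ _ _ _
            (by subst hS; simp [List.map_append, PySem.Set.ofList_append_singleton])
            (by subst hP; simp [List.map_append, PySem.Set.ofList_append_singleton])
            hmn.symm hmx.symm
            (Or.inr (pv_valid_extend part c hv hs hp (by omega)))
            (by simp)]
          apply List.filterMap_congr
          intro t ht
          simp only [Function.comp_apply]
          rw [← List.append_cons]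

-- the early `return []` only fires with a nonempty, empty-group forte_set
lemma pv_groupsA_ne_nil (pc : Int) (rest : List Int) (pisadas : List (Int × Int × Int))
    (gs : List (List (Int × Int × Int))) (h : pvGroupsA (pc :: rest) pisadas = some gs) :
    gs ≠ [] := by
  simp only [pvGroupsA] at h
  split at h
  · exact absurd h (by simp)
  · split at h
    · exact absurd h (by simp)
    · cases h; simp

-- ===== VERDICT (by name: the statement is the Claim_ definition above) =====
theorem positions_for_set_spec : Claim_equal_positions_for_set := by
  intro forte_set pisadas _ hpre
  unfold Spec_positions_for_set positions_for_set positions_for_set_alt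
  rw [pv_groups_eq]
  cases hg : pvGroupsA forte_set pisadas with
  | none => rfl
  | some groups =>
    have hgne : groups ≠ [] := by
      cases forte_set with
      | nil => exact absurd rfl hpre
      | cons pc rest => exact pv_groupsA_ne_nil pc rest pisadas groups hg
    dsimp only
    have hbt := pv_bt_eq groups [] PySem.Set.empty PySem.Set.empty none none rfl rfl rfl rfl
      (Or.inl rfl) (fun _ => hgne)
    rw [hbt]
    induction pvProduct groups with
    | nil => rfl
    | cons t ts ihh =>
      simp only [List.filterMap_cons, List.filter_cons, List.nil_append]
      cases hvt : pvIsValidChord t <;> simp [ihh]
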